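-- pv_equiv track=rewrite | github.com/oar-team/oar3 | oar_kao/interval.py | ordered_ids2itvs
-- ===== SOURCE A (Python) =====
-- def ordered_ids2itvs(ids):
--     itvs = []
--     if ids:
--         b = ids[0]
--         e = ids[0]
--         for i in ids:
--             if i > (e + 1):  # end itv and prepare new itv
--                 itvs.append((b, e))
--                 b = i
--             e = i
--         itvs.append((b, e))
--
--     return itvs
-- ===== SOURCE B (Python) =====
-- def ordered_ids2itvs(ids):
--     if not ids:
--         return []
--     breaks = [(x, y) for (x, y) in zip(ids, ids[1:]) if y > x + 1]
--     starts = [ids[0]] + [y for (_, y) in breaks]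
--     ends = [x for (x, _) in breaks] + [ids[-1]]
--     return list(zip(starts, ends))
-- ===== Notes on version B (the rewrite author's own statement) =====
-- stated objective: alternative
-- what changed: Instead of one stateful scan that emits intervals while tracking (b, e), B zips the list with its tail to find the gap pairs, derives the start and end columns separately from them, and zips the two columns into the interval list.
import Mathlib
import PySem

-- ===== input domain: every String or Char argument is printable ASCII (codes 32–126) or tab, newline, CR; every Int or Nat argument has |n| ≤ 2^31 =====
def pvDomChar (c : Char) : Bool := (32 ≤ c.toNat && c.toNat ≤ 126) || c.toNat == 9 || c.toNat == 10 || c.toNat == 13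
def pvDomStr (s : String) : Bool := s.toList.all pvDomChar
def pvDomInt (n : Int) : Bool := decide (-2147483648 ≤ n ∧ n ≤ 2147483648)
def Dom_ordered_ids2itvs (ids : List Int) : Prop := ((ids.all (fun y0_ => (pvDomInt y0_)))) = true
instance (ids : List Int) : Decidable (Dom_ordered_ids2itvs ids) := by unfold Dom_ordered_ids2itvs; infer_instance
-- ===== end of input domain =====

-- B replaces A's stateful emit-during-scan by a zip-with-tail pass extracting gap pairs,
-- from which the start and end columns are built and zipped (objective: alternative).

-- ===== PORT A =====
def ordered_ids2itvs (ids : List Int) : List (Int × Int) :=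
  match ids with
  | [] => []
  | h :: _ =>
    let s := ids.foldl
      (fun (st : List (Int × Int) × Int × Int) i =>
        if i > st.2.2 + 1 then (st.1 ++ [(st.2.1, st.2.2)], i, i) else (st.1, st.2.1, i))
      ([], h, h)
    s.1 ++ [(s.2.1, s.2.2)]

-- ===== PORT B =====
-- ids[-1] of the nonempty list h :: t
def pyLast1 (h : Int) (t : List Int) : Int :=
  match t with
  | [] => h
  | x :: t' => pyLast1 x t'

def ordered_ids2itvs_alt (ids : List Int) : List (Int × Int) :=
  match ids with
  | [] => []
  | h :: t =>
    let breaks := (List.zip (h :: t) t).filter (fun p => decide (p.2 > p.1 + 1))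
    let starts := h :: breaks.map Prod.snd
    let ends := breaks.map Prod.fst ++ [pyLast1 h t]
    List.zip starts ends

-- ===== PRECONDITION & SPEC =====
def Spec_ordered_ids2itvs (ids : List Int) (out : List (Int × Int)) : Prop := out = ordered_ids2itvs_alt ids
instance (ids : List Int) (out : List (Int × Int)) : Decidable (Spec_ordered_ids2itvs ids out) := by unfold Spec_ordered_ids2itvs; infer_instance

-- ===== CLAIM (what is proved, stated in full; the proofs are below) =====
def Claim_equal_ordered_ids2itvs : Prop := ∀ (ids : List Int), Dom_ordered_ids2itvs ids → Spec_ordered_ids2itvs ids (ordered_ids2itvs ids)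

-- ===== LEMMAS AND PROOFS =====

-- the loop body of A's port, for stating the invariant
def stepA (st : List (Int × Int) × Int × Int) (i : Int) : List (Int × Int) × Int × Int :=
  if i > st.2.2 + 1 then (st.1 ++ [(st.2.1, st.2.2)], i, i) else (st.1, st.2.1, i)

-- Invariant of A's loop, stated against B's zip/filter decomposition:
-- e is the element preceding t, b the pending start, acc the intervals already emitted.
theorem loop_eq (t : List Int) (acc : List (Int × Int)) (b e : Int) :
    ((t.foldl stepA (acc, b, e)).1
      ++ [((t.foldl stepA (acc, b, e)).2.1, (t.foldl stepA (acc, b, e)).2.2)]) =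
    acc ++ List.zip
      (b :: ((List.zip (e :: t) t).filter (fun p => decide (p.2 > p.1 + 1))).map Prod.snd)
      (((List.zip (e :: t) t).filter (fun p => decide (p.2 > p.1 + 1))).map Prod.fst
        ++ [pyLast1 e t]) := by
  induction t generalizing acc b e with
  | nil => simp [pyLast1]
  | cons i t' ih =>
    by_cases h : i > e + 1
    · have hs : stepA (acc, b, e) i = (acc ++ [(b, e)], i, i) := by simp [stepA, h]
      rw [List.foldl_cons, hs, ih]
      simp [List.zip_cons_cons, h, pyLast1]
    · have hs : stepA (acc, b, e) i = (acc, b, i) := by simp [stepA, h]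
      rw [List.foldl_cons, hs, ih]
      simp [List.zip_cons_cons, h, pyLast1]

-- ===== VERDICT (by name: the statement is the Claim_ definition above) =====
theorem ordered_ids2itvs_spec : Claim_equal_ordered_ids2itvs := by
  intro ids _
  unfold Spec_ordered_ids2itvs ordered_ids2itvs ordered_ids2itvs_alt
  match ids with
  | [] => rfl
  | h :: t =>
    show ((List.foldl stepA ([], h, h) (h :: t)).1
        ++ [((List.foldl stepA ([], h, h) (h :: t)).2.1,
             (List.foldl stepA ([], h, h) (h :: t)).2.2)]) = _
    have hstep : stepA ([], h, h) h = ([], h, h) := by simp [stepA]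
    rw [List.foldl_cons, hstep]
    simpa using loop_eq t [] h h
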